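-- pv_equiv track=rewrite | github.com/aywang71/PythonKattis | code/Demiliter Soup.py | findcur
-- ===== SOURCE A (Python) =====
-- def findcur(demiliter):
--   for i in range (0,len(demiliter)):
--     if demiliter[i] == '{':
--       for j in range (i+1,len(demiliter)):
--         if demiliter[j] == ' ':
--           continue
--         elif demiliter[j] == '}':
--           demiliter[i] = ' '
--           demiliter[j] = ' '
--           return demiliter, True
--         break
--   return demiliter, False
-- ===== SOURCE B (Python) =====
-- def findcur(demiliter):
--   open_pos = None
--   for i in range(len(demiliter)):
--     c = demiliter[i]
--     if open_pos is not None: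
--       if c == ' ':
--         continue
--       if c == '}':
--         demiliter[open_pos] = ' '
--         demiliter[i] = ' '
--         return demiliter, True
--       open_pos = i if c == '{' else None
--     elif c == '{':
--       open_pos = i
--   return demiliter, False
-- ===== Notes on version B (the rewrite author's own statement) =====
-- stated objective: alternative
-- what changed: Replaced A's nested loops (for each '{' rescan forward over the spaces after it) by a single left-to-right pass carrying the index of the pending '{' as a state variable.
import Mathlib
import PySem

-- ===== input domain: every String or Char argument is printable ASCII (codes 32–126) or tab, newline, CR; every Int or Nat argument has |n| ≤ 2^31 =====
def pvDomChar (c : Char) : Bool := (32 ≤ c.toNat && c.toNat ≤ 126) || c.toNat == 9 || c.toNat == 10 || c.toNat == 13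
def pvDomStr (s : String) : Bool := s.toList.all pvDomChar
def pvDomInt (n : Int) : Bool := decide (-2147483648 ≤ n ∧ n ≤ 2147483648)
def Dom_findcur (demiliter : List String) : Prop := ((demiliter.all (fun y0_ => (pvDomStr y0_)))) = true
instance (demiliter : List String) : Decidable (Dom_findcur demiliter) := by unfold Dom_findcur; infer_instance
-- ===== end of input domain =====

-- B replaces A's quadratic nested scan by a single left-to-right pass that carries the index of
-- the pending '{' (objective: alternative/idiomatic state machine; equal return value is proved).
-- Both Pythons mutate the list in place; the equivalence proved here is about the return value
-- (B performs the same in-place blanking as A).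

-- ===== PORT A =====
-- inner 'for j in range(i+1, len)' loop: some d' = the 'return demiliter, True' payload, none = fell through / break
def findcurInner (d : List String) (i : Nat) (j : Nat) : Option (List String) :=
  if j < d.length then
    if d.getD j "" = " " then findcurInner d i (j+1)
    else if d.getD j "" = "}" then some ((d.set i " ").set j " ")
    else none
  else none
termination_by d.length - j

-- outer 'for i in range(0, len)' loop
def findcurOuter (d : List String) (i : Nat) : List String × Bool :=
  if i < d.length then
    if d.getD i "" = "{" then
      match findcurInner d i (i+1) with
      | some d' => (d', true)
      | none => findcurOuter d (i+1)
    else findcurOuter d (i+1)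
  else (d, false)
termination_by d.length - i

def findcur (demiliter : List String) : List String × Bool :=
  findcurOuter demiliter 0

-- ===== PORT B =====
-- single pass; op = index of a pending '{' whose following characters so far were all spaces
def findcurLoop (d : List String) (i : Nat) (op : Option Nat) : List String × Bool :=
  if i < d.length then
    match op with
    | some p =>
      if d.getD i "" = " " then findcurLoop d (i+1) (some p)
      else if d.getD i "" = "}" then ((d.set p " ").set i " ", true)
      else findcurLoop d (i+1) (if d.getD i "" = "{" then some i else none)
    | none => findcurLoop d (i+1) (if d.getD i "" = "{" then some i else none)
  else (d, false)
termination_by d.length - i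

def findcur_alt (demiliter : List String) : List String × Bool :=
  findcurLoop demiliter 0 none

-- ===== PRECONDITION & SPEC =====
def Spec_findcur (demiliter : List String) (out : List String × Bool) : Prop := out = findcur_alt demiliter
instance (demiliter : List String) (out : List String × Bool) : Decidable (Spec_findcur demiliter out) := by unfold Spec_findcur; infer_instance

-- ===== CLAIM (what is proved, stated in full; the proofs are below) =====
def Claim_equal_findcur : Prop := ∀ (demiliter : List String), Dom_findcur demiliter → Spec_findcur demiliter (findcur demiliter)

-- ===== LEMMAS AND PROOFS =====

-- indices carrying " " are simply skipped by A's outer loop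
lemma findcurOuter_skip_spaces (d : List String) :
    ∀ n a b, b - a ≤ n → a ≤ b → (∀ k, a ≤ k → k < b → d.getD k "" = " ") →
      findcurOuter d a = findcurOuter d b := by
  intro n
  induction n with
  | zero => exact fun a b h1 h2 _ => (show a = b by omega) ▸ rfl
  | succ n ih =>
    intro a b h1 h2 hsp
    rcases Nat.eq_or_lt_of_le h2 with heq | hlt
    · exact heq ▸ rfl
    · have hsa : d.getD a "" = " " := hsp a le_rfl hlt
      have halen : a < d.length := by
        by_contra hge
        have h0 : d.getD a "" = "" := List.getD_eq_default _ _ (by omega)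
        rw [h0] at hsa
        exact absurd hsa (by decide)
      have hnb : ¬ d.getD a "" = "{" := by rw [hsa]; decide
      have step : findcurOuter d a = findcurOuter d (a+1) := by
        rw [findcurOuter, if_pos halen, if_neg hnb]
      rw [step]
      exact ih (a+1) b (by omega) (by omega) (fun k hk1 hk2 => hsp k (by omega) hk2)

-- the combined invariant: B's pass with no pending brace equals A's outer loop, and B's pass with
-- pending brace p (everything in (p, i) being spaces) equals A's inner scan from i continued as A continues
lemma findcur_main (d : List String) :
    ∀ n i, d.length - i ≤ n →
      (findcurOuter d i = findcurLoop d i none) ∧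
      (∀ p, p < i → d.getD p "" = "{" → (∀ k, p < k → k < i → d.getD k "" = " ") →
        findcurLoop d i (some p) =
          (match findcurInner d p i with
           | some d' => (d', true)
           | none => findcurOuter d (p+1))) := by
  intro n
  induction n with
  | zero =>
    intro i h1
    have hlen : ¬ i < d.length := by omega
    constructor
    · rw [findcurOuter, findcurLoop, if_neg hlen, if_neg hlen]
    · intro p hp hbp hsp
      rw [findcurLoop, findcurInner, if_neg hlen, if_neg hlen]
      show (d, false) = findcurOuter d (p+1)
      rw [findcurOuter_skip_spaces d i (p+1) i (by omega) (by omega)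
        (fun k hk1 hk2 => hsp k (by omega) hk2)]
      rw [findcurOuter, if_neg hlen]
  | succ n ih =>
    intro i h1
    by_cases hlen : i < d.length
    case neg =>
      constructor
      · rw [findcurOuter, findcurLoop, if_neg hlen, if_neg hlen]
      · intro p hp hbp hsp
        rw [findcurLoop, findcurInner, if_neg hlen, if_neg hlen]
        show (d, false) = findcurOuter d (p+1)
        rw [findcurOuter_skip_spaces d i (p+1) i (by omega) (by omega)
          (fun k hk1 hk2 => hsp k (by omega) hk2)]
        rw [findcurOuter, if_neg hlen]
    case pos =>
      have hn : d.length - (i+1) ≤ n := by omega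
      constructor
      · by_cases hc : d.getD i "" = "{"
        · rw [findcurOuter, findcurLoop, if_pos hlen, if_pos hlen, if_pos hc, if_pos hc]
          exact ((ih (i+1) hn).2 i (by omega) hc (fun k hk1 hk2 => by omega)).symm
        · rw [findcurOuter, findcurLoop, if_pos hlen, if_pos hlen, if_neg hc, if_neg hc]
          exact (ih (i+1) hn).1
      · intro p hp hbp hsp
        by_cases h1c : d.getD i "" = " "
        · rw [findcurLoop, findcurInner, if_pos hlen, if_pos hlen, if_pos h1c, if_pos h1c]
          exact (ih (i+1) hn).2 p (by omega) hbp
            (fun k hk1 hk2 => by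
              by_cases hk : k = i
              · rw [hk]; exact h1c
              · exact hsp k hk1 (by omega))
        · by_cases h2c : d.getD i "" = "}"
          · rw [findcurLoop, findcurInner, if_pos hlen, if_pos hlen,
              if_neg h1c, if_neg h1c, if_pos h2c, if_pos h2c]
          · rw [findcurLoop, findcurInner, if_pos hlen, if_pos hlen,
              if_neg h1c, if_neg h1c, if_neg h2c, if_neg h2c]
            show findcurLoop d (i+1) (if d.getD i "" = "{" then some i else none)
              = findcurOuter d (p+1)
            rw [findcurOuter_skip_spaces d i (p+1) i (by omega) (by omega)
              (fun k hk1 hk2 => hsp k (by omega) hk2)]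
            by_cases hc : d.getD i "" = "{"
            · rw [if_pos hc, findcurOuter, if_pos hlen, if_pos hc]
              exact (ih (i+1) hn).2 i (by omega) hc (fun k hk1 hk2 => by omega)
            · rw [if_neg hc, findcurOuter, if_pos hlen, if_neg hc]
              exact ((ih (i+1) hn).1).symm

-- ===== VERDICT (by name: the statement is the Claim_ definition above) =====
theorem findcur_spec : Claim_equal_findcur := by
  intro d _
  unfold Spec_findcur findcur findcur_alt
  exact (findcur_main d d.length 0 (by omega)).1
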